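-- pv_equiv track=rewrite | github.com/airfork/text-cleaner | src/text_cleaner/operations.py | sentence_case
-- ===== SOURCE A (Python) =====
-- def sentence_case(text: str) -> str:
--     lowered = text.lower()
--     chars = list(lowered)
--     capitalize_next = True
--
--     for index, char in enumerate(chars):
--         if capitalize_next and char.isalpha():
--             chars[index] = char.upper()
--             capitalize_next = False
--         if char in ".!?":
--             capitalize_next = True
--
--     return "".join(chars)
-- ===== SOURCE B (Python) =====
-- def _first_alpha(piece):
--     for k, ch in enumerate(piece):
--         if ch.isalpha():
--             return k
--     return None
--
--
-- def sentence_case(text: str) -> str: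
--     # Split the lowered text into tagged pieces: (True, terminator char) or
--     # (False, maximal terminator-free chunk), then process pieces with a flag.
--     pieces = []
--     current = ""
--     for ch in text.lower():
--         if ch in ".!?":
--             if current:
--                 pieces.append((False, current))
--                 current = ""
--             pieces.append((True, ch))
--         else:
--             current += ch
--     if current:
--         pieces.append((False, current))
--
--     out = []
--     cap = True
--     for is_term, piece in pieces:
--         if is_term:
--             out.append(piece)
--             cap = True
--         elif cap:
--             k = _first_alpha(piece)
--             if k is None:
--                 out.append(piece)
--             else:
--                 out.append(piece[:k] + piece[k].upper() + piece[k + 1:])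
--                 cap = False
--         else:
--             out.append(piece)
--     return "".join(out)
-- ===== Notes on version B (the rewrite author's own statement) =====
-- stated objective: alternative
-- what changed: B first splits the lowered text into tagged pieces (terminators vs terminator-free chunks) and then processes whole pieces with a capitalize flag, uppercasing the first letter of a chunk by a find-index-and-splice step, instead of A's single character-by-character stateful scan with in-place list mutation.
import Mathlib
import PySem

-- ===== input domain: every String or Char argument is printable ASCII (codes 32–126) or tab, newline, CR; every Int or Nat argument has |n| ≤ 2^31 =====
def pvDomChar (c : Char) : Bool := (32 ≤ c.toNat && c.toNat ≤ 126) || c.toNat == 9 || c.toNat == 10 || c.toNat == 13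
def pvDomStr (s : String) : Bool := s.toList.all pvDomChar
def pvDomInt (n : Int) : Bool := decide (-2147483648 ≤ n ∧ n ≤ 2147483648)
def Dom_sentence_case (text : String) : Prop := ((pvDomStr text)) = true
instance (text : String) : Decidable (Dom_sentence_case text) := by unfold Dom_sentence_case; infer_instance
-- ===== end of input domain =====

-- B splits the lowered text into tagged pieces (terminators vs terminator-free chunks)
-- and processes pieces with a capitalize flag, instead of A's char-by-char stateful scan;
-- objective: alternative (same cost, different decomposition).


-- ===== PORT A =====
-- `char in ".!?"` for a single character is exactly this 3-way comparison
def pvIsTerm (c : Char) : Bool := c == '.' || c == '!' || c == '?'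

-- the for-loop over enumerate(chars): each position is rewritten from the original char
-- (the in-place write at the current index never affects a later read), flag threaded through
def scGoA : List Char → Bool → List Char
  | [], _ => []
  | c :: rest, cap =>
    let p := if cap && PySem.Chars.isalpha c then (PySem.Chars.upperChar c, false) else (c, cap)
    let cap' := if pvIsTerm c then true else p.2
    p.1 :: scGoA rest cap'

def sentence_case (text : String) : String :=
  String.ofList (scGoA (PySem.Str.lower text).toList true)

-- ===== PORT B =====
-- _first_alpha: index of first alphabetic char, None if absent
def scFirstAlpha : List Char → Option Nat
  | [] => none
  | c :: rest => if PySem.Chars.isalpha c then some 0 else (scFirstAlpha rest).map (· + 1)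

-- first loop of B: split into tagged pieces (true = terminator, false = terminator-free chunk)
def scSplit : List Char → List Char → List (Bool × List Char)
  | [], cur => if cur = [] then [] else [(false, cur)]
  | c :: rest, cur =>
    if pvIsTerm c then
      if cur = [] then (true, [c]) :: scSplit rest []
      else (false, cur) :: (true, [c]) :: scSplit rest []
    else scSplit rest (cur ++ [c])

-- piece[:k] + piece[k].upper() + piece[k+1:] for an in-range index k (slices = take/drop here)
def scCapAt (p : List Char) (k : Nat) : List Char :=
  p.take k ++ ((p[k]?.map PySem.Chars.upperChar).toList) ++ p.drop (k + 1)

-- second loop of B over the pieces, with the cap flag; out parts joined by consing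
def scProc : List (Bool × List Char) → Bool → List Char
  | [], _ => []
  | (tag, p) :: rest, cap =>
    if tag then p ++ scProc rest true
    else if cap then
      match scFirstAlpha p with
      | none => p ++ scProc rest cap
      | some k => scCapAt p k ++ scProc rest false
    else p ++ scProc rest cap

def sentence_case_alt (text : String) : String :=
  String.ofList (scProc (scSplit (PySem.Str.lower text).toList []) true)

-- ===== PRECONDITION & SPEC =====
def Spec_sentence_case (text : String) (out : String) : Prop := out = sentence_case_alt text
instance (text : String) (out : String) : Decidable (Spec_sentence_case text out) := by unfold Spec_sentence_case; infer_instance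

-- ===== CLAIM (what is proved, stated in full; the proofs are below) =====
def Claim_equal_sentence_case : Prop := ∀ (text : String), Dom_sentence_case text → Spec_sentence_case text (sentence_case text)

-- ===== LEMMAS AND PROOFS =====

-- on a terminator-free chunk with the flag down, A's scan is the identity
theorem scGoA_false_of_noTerm (p : List Char) (h : ∀ c ∈ p, pvIsTerm c = false) :
    scGoA p false = p := by
  induction p with
  | nil => rfl
  | cons c rest ih =>
    simp [scGoA, h c (List.mem_cons_self ..)]
    exact ih (fun d hd => h d (List.mem_cons_of_mem _ hd))

-- on a terminator-free chunk, A's scan equals B's piece processing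
theorem scGoA_noTerm (p : List Char) (cap : Bool) (h : ∀ c ∈ p, pvIsTerm c = false) :
    scGoA p cap = if cap then (match scFirstAlpha p with
                               | none => p
                               | some k => scCapAt p k)
                  else p := by
  induction p generalizing cap with
  | nil => cases cap <;> simp [scGoA, scFirstAlpha]
  | cons c rest ih =>
    have hc := h c (List.mem_cons_self ..)
    have hrest : ∀ d ∈ rest, pvIsTerm d = false :=
      fun d hd => h d (List.mem_cons_of_mem _ hd)
    cases cap with
    | false =>
      simp [scGoA, hc]
      exact scGoA_false_of_noTerm rest hrest
    | true =>
      by_cases ha : PySem.Chars.isalpha c = true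
      · simp [scGoA, hc, ha, scFirstAlpha, scCapAt]
        exact scGoA_false_of_noTerm rest hrest
      · simp only [Bool.not_eq_true] at ha
        simp [scGoA, hc, ha]
        rw [ih true hrest]
        simp only [scFirstAlpha, ha, Bool.false_eq_true, if_false]
        cases hfa : scFirstAlpha rest with
        | none => simp
        | some k => simp [scCapAt, List.take_succ_cons, List.drop_succ_cons]

-- a terminator is not alphabetic
theorem scTerm_not_alpha (c : Char) (h : pvIsTerm c = true) :
    PySem.Chars.isalpha c = false := by
  simp only [pvIsTerm, Bool.or_eq_true, beq_iff_eq] at h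
  rcases h with (h | h) | h <;> subst h <;> decide

-- A's scan splits at a terminator that follows a terminator-free chunk
theorem scGoA_chunk_term (cur : List Char) (c : Char) (rest : List Char) (cap : Bool)
    (h : ∀ d ∈ cur, pvIsTerm d = false) (hterm : pvIsTerm c = true) :
    scGoA (cur ++ c :: rest) cap = scGoA cur cap ++ c :: scGoA rest true := by
  induction cur generalizing cap with
  | nil => simp [scGoA, hterm, scTerm_not_alpha c hterm]
  | cons d ds ihd =>
    have hd := h d (List.mem_cons_self ..)
    have hds : ∀ e ∈ ds, pvIsTerm e = false :=
      fun e he => h e (List.mem_cons_of_mem _ he)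
    by_cases hda : (cap && PySem.Chars.isalpha d) = true
    · simp only [List.cons_append, scGoA, hd, hda, Bool.false_eq_true, if_false, if_true]
      rw [ihd false hds]
    · simp only [Bool.not_eq_true] at hda
      simp only [List.cons_append, scGoA, hd, hda, Bool.false_eq_true, if_false]
      rw [ihd cap hds]

-- main invariant: processing B's split of (cur ++ xs) equals A's scan, for terminator-free cur
theorem scMain (xs : List Char) (cur : List Char) (cap : Bool)
    (h : ∀ c ∈ cur, pvIsTerm c = false) :
    scProc (scSplit xs cur) cap = scGoA (cur ++ xs) cap := by
  induction xs generalizing cur cap with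
  | nil =>
    by_cases hcur : cur = []
    · subst hcur; simp [scSplit, scProc, scGoA]
    · simp only [scSplit, if_neg hcur, List.append_nil]
      rw [scGoA_noTerm cur cap h]
      cases cap with
      | false => simp [scProc]
      | true =>
        cases hfa : scFirstAlpha cur with
        | none => simp [scProc, hfa]
        | some k => simp [scProc, hfa]
  | cons c rest ih =>
    by_cases hterm : pvIsTerm c = true
    · have hna := scTerm_not_alpha c hterm
      by_cases hcur : cur = []
      · subst hcur
        simp only [scSplit, if_pos hterm, List.nil_append]
        simp [scProc, scGoA, hterm, hna, ih [] true (by simp)]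
      · simp only [scSplit, if_pos hterm, if_neg hcur]
        have hr := ih [] true (by simp)
        simp only [List.nil_append] at hr
        rw [scGoA_chunk_term cur c rest cap h hterm, scGoA_noTerm cur cap h, ← hr]
        cases cap with
        | false => simp [scProc]
        | true =>
          cases hfa : scFirstAlpha cur with
          | none => simp [scProc, hfa]
          | some k => simp [scProc, hfa]
    · simp only [Bool.not_eq_true] at hterm
      have hcur' : ∀ d ∈ cur ++ [c], pvIsTerm d = false := by
        intro d hd
        rcases List.mem_append.mp hd with hd | hd
        · exact h d hd
        · simp at hd; subst hd; exact hterm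
      simp only [scSplit, hterm, Bool.false_eq_true, if_false]
      rw [ih (cur ++ [c]) cap hcur']
      simp

-- ===== VERDICT (by name: the statement is the Claim_ definition above) =====
theorem sentence_case_spec : Claim_equal_sentence_case := by
  intro text _
  unfold Spec_sentence_case sentence_case sentence_case_alt
  rw [scMain _ [] true (by simp)]
  simp
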